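-- pv_equiv track=rewrite | github.com/PrabhuRajendhran/emailai-thoughts | advanced_document_extraction.py | consensus_merge
-- ===== SOURCE A (Python) =====
-- from collections import defaultdict
--
-- def consensus_merge(field_lists):
--
--     votes = defaultdict(list)
--
--     for fields in field_lists:
--
--         for f in fields:
--             votes[f["field"]].append(f)
--
--     final = {}
--
--     for field, candidates in votes.items():
--
--         # majority voting by value
--         counter = defaultdict(int)
--
--         for c in candidates:
--             counter[c["value"]] += 1
--
--         best_value = max(counter, key=counter.get)
--
--         for c in candidates:
--             if c["value"] == best_value:
--                 final[field] = c
--                 break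
--
--     return final
-- ===== SOURCE B (Python) =====
-- def consensus_merge(field_lists):
--     # One pass: tally[field][value] = (count, first candidate with that value);
--     # then pick, per field, the stored candidate of the first value reaching the max count.
--     tally = {}
--     for fields in field_lists:
--         for f in fields:
--             field, value = f["field"], f["value"]
--             inner = tally.setdefault(field, {})
--             entry = inner.get(value)
--             if entry is None:
--                 inner[value] = (1, f)
--             else:
--                 inner[value] = (entry[0] + 1, entry[1])
--     final = {}
--     for field, inner in tally.items():
--         best = None
--         for count_cand in inner.values():
--             if best is None or count_cand[0] > best[0]:
--                 best = count_cand
--         final[field] = best[1]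
--     return final
-- ===== Notes on version B (the rewrite author's own statement) =====
-- stated objective: alternative
-- what changed: Instead of A's two phases (group every candidate per field, then per field rebuild a value counter and rescan the candidate list for the winner), B makes one traversal maintaining tally[field][value] = (count, first candidate) and then selects each field's winner by a single arg-max scan over the inner dict, so no candidate list is stored or rescanned.
import Mathlib
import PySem

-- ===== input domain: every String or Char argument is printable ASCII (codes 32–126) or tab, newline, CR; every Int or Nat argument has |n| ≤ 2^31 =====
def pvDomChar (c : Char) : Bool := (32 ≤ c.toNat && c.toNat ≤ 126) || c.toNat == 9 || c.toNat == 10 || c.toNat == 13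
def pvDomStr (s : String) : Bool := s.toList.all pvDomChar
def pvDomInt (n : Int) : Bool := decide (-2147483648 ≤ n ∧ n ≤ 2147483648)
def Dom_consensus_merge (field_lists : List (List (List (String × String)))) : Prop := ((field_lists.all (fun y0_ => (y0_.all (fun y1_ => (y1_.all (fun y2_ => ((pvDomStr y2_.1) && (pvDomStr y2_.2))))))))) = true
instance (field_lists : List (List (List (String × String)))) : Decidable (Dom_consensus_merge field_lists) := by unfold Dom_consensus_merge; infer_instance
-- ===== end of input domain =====

-- B replaces A's two-phase "group all candidates per field, then per field rebuild a value counter and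
-- rescan the candidate list" by a single traversal maintaining tally[field][value] = (count, first candidate),
-- followed by a linear arg-max over each inner dict (objective: alternative data structure, no rescan).

-- f[k] for a Python dict f; exact whenever k is a key of f (guaranteed by Pre_ for "field"/"value")
def pvGet (f : List (String × String)) (k : String) : String :=
  ((PySem.Dict.mk f).get? k).getD ""

-- ===== PORT A =====
def consensus_merge (field_lists : List (List (List (String × String)))) : List (String × List (String × String)) :=
  -- votes = defaultdict(list); for fields in field_lists: for f in fields: votes[f["field"]].append(f)
  let votes : PySem.Dict String (List (List (String × String))) :=
    field_lists.foldl (fun v fields =>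
      fields.foldl (fun v f => v.modify (pvGet f "field") [] (· ++ [f])) v) PySem.Dict.empty
  -- final = {}; for field, candidates in votes.items(): …
  let final : PySem.Dict String (List (String × String)) :=
    votes.items.foldl (fun fin p =>
      let field := p.1
      let candidates := p.2
      -- counter = defaultdict(int); for c in candidates: counter[c["value"]] += 1
      let counter : PySem.Dict String Int :=
        candidates.foldl (fun c cand => c.modify (pvGet cand "value") 0 (· + 1)) PySem.Dict.empty
      -- best_value = max(counter, key=counter.get)  (counter.get k = counter.getD k 0 on every key of counter)
      match PySem.List.max? counter.keys (fun k => counter.getD k 0) with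
      | none => fin              -- unreachable: candidates is never empty
      | some best_value =>
        -- for c in candidates: if c["value"] == best_value: final[field] = c; break
        match candidates.find? (fun c => pvGet c "value" == best_value) with
        | some c => fin.insert field c
        | none => fin) PySem.Dict.empty
  final.items

-- ===== PORT B =====
def consensus_merge_alt (field_lists : List (List (List (String × String)))) : List (String × List (String × String)) :=
  -- tally = {}; one pass: tally[field][value] = (count, first candidate with that value)
  let tally : PySem.Dict String (PySem.Dict String (Int × List (String × String))) :=
    field_lists.foldl (fun t fields =>
      fields.foldl (fun t f =>
        let field := pvGet f "field"
        let value := pvGet f "value"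
        let inner := t.getD field PySem.Dict.empty
        t.insert field (match inner.get? value with
          | some e => inner.insert value (e.1 + 1, e.2)
          | none => inner.insert value (1, f))) t) PySem.Dict.empty
  -- final = {}; for field, inner in tally.items(): best = first pair with maximal count; final[field] = best[1]
  let final : PySem.Dict String (List (String × String)) :=
    tally.items.foldl (fun fin p =>
      let best := p.2.values.foldl (fun best q =>
        match best with
        | none => some q
        | some b => if q.1 > b.1 then some q else some b) none
      match best with
      | some b => fin.insert p.1 b.2
      | none => fin) PySem.Dict.empty    -- none unreachable: inner dicts are never empty
  final.items

-- ===== PRECONDITION & SPEC =====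
-- Pre_ excludes exactly the inputs where some candidate dict lacks the key "field" or "value",
-- on which Python A raises KeyError.
def Pre_consensus_merge (field_lists : List (List (List (String × String)))) : Prop :=
  ∀ fields ∈ field_lists, ∀ f ∈ fields,
    (PySem.Dict.mk f).contains "field" = true ∧ (PySem.Dict.mk f).contains "value" = true
instance (field_lists : List (List (List (String × String)))) : Decidable (Pre_consensus_merge field_lists) := by
  unfold Pre_consensus_merge; infer_instance
def pvWitness_consensus_merge : (List (List (List (String × String)))) :=
  [[[("field", "a"), ("value", "x")], [("field", "a"), ("value", "x")]], [[("field", "b"), ("value", "y")]]]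

def Spec_consensus_merge (field_lists : List (List (List (String × String)))) (out : List (String × List (String × String))) : Prop := out = consensus_merge_alt field_lists
instance (field_lists : List (List (List (String × String)))) (out : List (String × List (String × String))) : Decidable (Spec_consensus_merge field_lists out) := by unfold Spec_consensus_merge; infer_instance

-- ===== CLAIM (what is proved, stated in full; the proofs are below) =====
def Claim_equal_consensus_merge : Prop := ∀ (field_lists : List (List (List (String × String)))), Dom_consensus_merge field_lists → Pre_consensus_merge field_lists → Spec_consensus_merge field_lists (consensus_merge field_lists)

-- ===== LEMMAS AND PROOFS =====

-- abbreviations for the two programs' pieces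
def fv (c : List (String × String)) : String := pvGet c "value"
def ffld (c : List (String × String)) : String := pvGet c "field"

def AStep (v : PySem.Dict String (List (List (String × String)))) (f : List (String × String)) :
    PySem.Dict String (List (List (String × String))) :=
  v.modify (ffld f) [] (· ++ [f])

def IStep (inn : PySem.Dict String (Int × List (String × String))) (f : List (String × String)) :
    PySem.Dict String (Int × List (String × String)) :=
  match inn.get? (fv f) with
  | some e => inn.insert (fv f) (e.1 + 1, e.2)
  | none => inn.insert (fv f) (1, f)

def BStep (t : PySem.Dict String (PySem.Dict String (Int × List (String × String))))
    (f : List (String × String)) : PySem.Dict String (PySem.Dict String (Int × List (String × String))) :=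
  t.insert (ffld f) (IStep (t.getD (ffld f) PySem.Dict.empty) f)

def innerOf (cs : List (List (String × String))) : PySem.Dict String (Int × List (String × String)) :=
  cs.foldl IStep PySem.Dict.empty

def AFin (fin : PySem.Dict String (List (String × String)))
    (p : String × List (List (String × String))) : PySem.Dict String (List (String × String)) :=
  let counter : PySem.Dict String Int :=
    p.2.foldl (fun c cand => c.modify (pvGet cand "value") 0 (· + 1)) PySem.Dict.empty
  match PySem.List.max? counter.keys (fun k => counter.getD k 0) with
  | none => fin
  | some best_value =>
    match p.2.find? (fun c => pvGet c "value" == best_value) with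
    | some c => fin.insert p.1 c
    | none => fin

def BFin (fin : PySem.Dict String (List (String × String)))
    (p : String × PySem.Dict String (Int × List (String × String))) :
    PySem.Dict String (List (String × String)) :=
  match p.2.values.foldl (fun best q =>
      match best with
      | none => some q
      | some b => if q.1 > b.1 then some q else some b) none with
  | some b => fin.insert p.1 b.2
  | none => fin

def mapVals (g : List (List (String × String)) → PySem.Dict String (Int × List (String × String)))
    (d : PySem.Dict String (List (List (String × String)))) :
    PySem.Dict String (PySem.Dict String (Int × List (String × String))) :=
  PySem.Dict.mk (d.items.map (fun p => (p.1, g p.2)))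

def firstW (cs : List (List (String × String))) (v : String) : List (String × String) :=
  (cs.find? (fun c => fv c == v)).getD []

-- the two ports as flat folds
lemma portA_eq (fl : List (List (List (String × String)))) :
    consensus_merge fl = ((fl.flatten.foldl AStep PySem.Dict.empty).items.foldl AFin PySem.Dict.empty).items := by
  rw [List.foldl_flatten]; rfl

lemma portB_eq (fl : List (List (List (String × String)))) :
    consensus_merge_alt fl = ((fl.flatten.foldl BStep PySem.Dict.empty).items.foldl BFin PySem.Dict.empty).items := by
  rw [List.foldl_flatten]; rfl

-- mapVals commutes with lookups and insertion
lemma contains_mapVals (g : List (List (String × String)) → PySem.Dict String (Int × List (String × String)))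
    (d : PySem.Dict String (List (List (String × String)))) (k : String) :
    (mapVals g d).contains k = d.contains k := by
  simp [mapVals, PySem.Dict.contains, List.any_map, Function.comp_def]

lemma get?_mapVals (g : List (List (String × String)) → PySem.Dict String (Int × List (String × String)))
    (d : PySem.Dict String (List (List (String × String)))) (k : String) :
    (mapVals g d).get? k = (d.get? k).map g := by
  simp [mapVals, PySem.Dict.get?, List.find?_map, Function.comp_def, Option.map_map]

lemma insert_mapVals (g : List (List (String × String)) → PySem.Dict String (Int × List (String × String)))
    (d : PySem.Dict String (List (List (String × String)))) (k : String) (w : List (List (String × String))) :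
    mapVals g (d.insert k w) = (mapVals g d).insert k (g w) := by
  simp only [PySem.Dict.insert, contains_mapVals]
  split_ifs with h
  · unfold mapVals
    congr 1
    simp only [List.map_map]
    apply List.map_congr_left
    intro p _
    by_cases hp : p.1 = k <;> simp [hp]
  · unfold mapVals
    congr 1
    simp

-- one pass of B = one pass of A, through mapVals innerOf
lemma step_comm (v : PySem.Dict String (List (List (String × String)))) (f : List (String × String)) :
    BStep (mapVals innerOf v) f = mapVals innerOf (AStep v f) := by
  unfold BStep AStep
  simp only [PySem.Dict.modify]
  rw [insert_mapVals]
  congr 1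
  have h1 : innerOf (v.getD (ffld f) [] ++ [f]) = IStep (innerOf (v.getD (ffld f) [])) f := by
    simp [innerOf, List.foldl_append]
  rw [h1]
  congr 1
  simp only [PySem.Dict.getD, get?_mapVals]
  cases v.get? (ffld f) <;> rfl

lemma tally_eq (cs : List (List (String × String))) :
    ∀ v, cs.foldl BStep (mapVals innerOf v) = mapVals innerOf (cs.foldl AStep v) := by
  induction cs with
  | nil => intro v; rfl
  | cons f cs ih =>
    intro v
    simp only [List.foldl_cons, step_comm]
    exact ih _

lemma find?_fv_isSome {cs : List (List (String × String))} {v : String} (h : v ∈ cs.map fv) :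
    ∃ c, cs.find? (fun c => fv c == v) = some c := by
  rw [List.mem_map] at h
  obtain ⟨c, hc, he⟩ := h
  exact Option.isSome_iff_exists.mp (List.find?_isSome.mpr ⟨c, hc, by simp [he]⟩)

lemma firstW_append_of_mem (cs : List (List (String × String))) (f : List (String × String))
    (v : String) (h : v ∈ cs.map fv) : firstW (cs ++ [f]) v = firstW cs v := by
  obtain ⟨c, hc⟩ := find?_fv_isSome h
  simp [firstW, List.find?_append, hc]

lemma count_append_same (vs : List String) (k : String) :
    List.count k (vs ++ [k]) = List.count k vs + 1 := by
  simp [List.count_append]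

lemma count_append_other (vs : List String) (k v : String) (h : v ≠ k) :
    List.count v (vs ++ [k]) = List.count v vs := by
  have h1 : List.count v [k] = 0 := by
    simp [List.count_singleton]
    exact fun hk => h hk.symm
  rw [List.count_append, h1]
  omega

-- characterization of the inner tally built from a candidate list
lemma innerOf_items (cs : List (List (String × String))) :
    (innerOf cs).items = (PySem.Set.ofList (cs.map fv)).map
      (fun v => (v, (((cs.map fv).count v : Int), firstW cs v))) := by
  induction cs using List.reverseRecOn with
  | nil => rfl
  | append_singleton cs f ih =>
    have hstep : innerOf (cs ++ [f]) = IStep (innerOf cs) f := by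
      simp [innerOf, List.foldl_append]
    rw [hstep]
    have hget : (innerOf cs).get? (fv f)
        = ((PySem.Set.ofList (cs.map fv)).find? (fun v => v == fv f)).map
            (fun v => (((cs.map fv).count v : Int), firstW cs v)) := by
      simp [PySem.Dict.get?, ih, List.find?_map, Function.comp_def, Option.map_map]
    by_cases hmem : fv f ∈ cs.map fv
    · have hS : fv f ∈ PySem.Set.ofList (cs.map fv) := (PySem.Set.mem_ofList _ _).mpr hmem
      have hfind : (PySem.Set.ofList (cs.map fv)).find? (fun v => v == fv f) = some (fv f) := by
        have hsome : ((PySem.Set.ofList (cs.map fv)).find? (fun v => v == fv f)).isSome :=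
          List.find?_isSome.mpr ⟨fv f, hS, by exact beq_self_eq_true (fv f)⟩
        obtain ⟨y, hy⟩ := Option.isSome_iff_exists.mp hsome
        have hy2 : y = fv f := eq_of_beq (List.find?_some (p := fun v => v == fv f) hy)
        rw [hy, hy2]
      have hget2 : (innerOf cs).get? (fv f)
          = some ((((cs.map fv).count (fv f) : Int)), firstW cs (fv f)) := by
        rw [hget, hfind]; rfl
      have hcont : (innerOf cs).contains (fv f) = true := by
        rw [PySem.Dict.contains_eq_isSome_get?, hget2]; rfl
      have hset : PySem.Set.ofList ((cs ++ [f]).map fv) = PySem.Set.ofList (cs.map fv) := by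
        rw [List.map_append, List.map_singleton, PySem.Set.ofList_append_singleton]
        simp only [PySem.Set.add]
        rw [if_pos ((PySem.Set.contains_iff _ _).mpr hS)]
      unfold IStep
      rw [hget2]
      rw [PySem.Dict.items_insert_of_contains _ _ hcont, ih, hset, List.map_map]
      apply List.map_congr_left
      intro v hv
      have hvs : v ∈ cs.map fv := (PySem.Set.mem_ofList _ _).mp hv
      by_cases hveq : v = fv f
      · subst hveq
        simp only [Function.comp_def, beq_self_eq_true, if_pos, List.map_append,
          List.map_singleton, count_append_same, firstW_append_of_mem cs f (fv f) hvs]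
        simp
      · simp [List.map_append,
          count_append_other (cs.map fv) (fv f) v hveq,
          firstW_append_of_mem cs f v hvs]
        exact fun h => absurd h hveq
    · have hSno : fv f ∉ PySem.Set.ofList (cs.map fv) := fun h =>
        hmem ((PySem.Set.mem_ofList _ _).mp h)
      have hfind : (PySem.Set.ofList (cs.map fv)).find? (fun v => v == fv f) = none :=
        List.find?_eq_none.mpr (fun x hx he => hSno (eq_of_beq he ▸ hx))
      have hget2 : (innerOf cs).get? (fv f) = none := by rw [hget, hfind]; rfl
      have hcont : (innerOf cs).contains (fv f) = false := by
        rw [PySem.Dict.contains_eq_isSome_get?, hget2]; rfl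
      have hset : PySem.Set.ofList ((cs ++ [f]).map fv)
          = PySem.Set.ofList (cs.map fv) ++ [fv f] := by
        rw [List.map_append, List.map_singleton, PySem.Set.ofList_append_singleton]
        have hcf : ¬ ((PySem.Set.ofList (cs.map fv)).contains (fv f) = true) := fun h =>
          hSno ((PySem.Set.contains_iff _ _).mp h)
        simp only [PySem.Set.add]
        rw [if_neg hcf]
      have hnofind : cs.find? (fun c => fv c == fv f) = none :=
        List.find?_eq_none.mpr (fun c hc he => hmem (List.mem_map.mpr ⟨c, hc, eq_of_beq he⟩))
      unfold IStep
      rw [hget2]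
      rw [PySem.Dict.items_insert_of_not_contains _ _ hcont, ih, hset, List.map_append]
      congr 1
      · apply List.map_congr_left
        intro v hv
        have hvs : v ∈ cs.map fv := (PySem.Set.mem_ofList _ _).mp hv
        have hveq : v ≠ fv f := fun he => hmem (he ▸ hvs)
        simp [count_append_other (cs.map fv) (fv f) v hveq,
          firstW_append_of_mem cs f v hvs]
      · have hcount0 : List.count (fv f) (cs.map fv) = 0 := List.count_eq_zero.mpr hmem
        simp [hcount0, firstW, List.find?_append, hnofind]

-- B's strict-> arg-max fold over tagged pairs is Python's max with key
lemma gmax_eq (l : List String) (key : String → Int) (w : String → List (String × String)) :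
    (l.map (fun v => ((key v, w v) : Int × List (String × String)))).foldl (fun best q =>
        match best with
        | none => some q
        | some b => if q.1 > b.1 then some q else some b) none
      = (PySem.List.max? l key).map (fun m => (key m, w m)) := by
  have aux : ∀ (l : List String) (acc : Option String),
      (l.map (fun v => ((key v, w v) : Int × List (String × String)))).foldl (fun best q =>
          match best with
          | none => some q
          | some b => if q.1 > b.1 then some q else some b)
        (acc.map (fun m => (key m, w m)))
      = (l.foldl (fun acc x =>
          match acc with
          | none => some x
          | some m => if key m < key x then some x else some m) acc).map (fun m => (key m, w m)) := by
    intro l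
    induction l with
    | nil => intro acc; rfl
    | cons v l ih =>
      intro acc
      simp only [List.map_cons, List.foldl_cons]
      rw [← ih]
      congr 1
      cases acc with
      | none => rfl
      | some m => by_cases h : key m < key v <;> simp [gt_iff_lt, h]
  have hmax : PySem.List.max? l key = (l.foldl (fun acc x =>
          match acc with
          | none => some x
          | some m => if key m < key x then some x else some m) none) := by
    unfold PySem.List.max?
    congr 1
    funext acc x
    cases acc with
    | none => rfl
    | some m => by_cases hlt : key m < key x <;> simp [hlt]
  rw [hmax]
  simpa using aux l none

lemma max?_mem (l : List String) (key : String → Int) (m : String)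
    (h : PySem.List.max? l key = some m) : m ∈ l := by
  have aux : ∀ (l : List String) (acc : Option String),
      l.foldl (fun acc x =>
          match acc with
          | none => some x
          | some m => if key m < key x then some x else some m) acc = some m →
      m ∈ l ∨ acc = some m := by
    intro l
    induction l with
    | nil => intro acc h; exact Or.inr h
    | cons v l ih =>
      intro acc h
      rcases ih _ h with hm | hm
      · exact Or.inl (List.mem_cons_of_mem _ hm)
      · cases acc with
        | none =>
          simp only at hm
          exact Or.inl (by simp [Option.some.injEq] at hm; simp [hm])
        | some a =>
          simp only at hm
          by_cases hlt : key a < key v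
          · simp [hlt] at hm; exact Or.inl (by simp [hm])
          · simp [hlt] at hm; exact Or.inr (by simp [hm])
  have hmax : PySem.List.max? l key = (l.foldl (fun acc x =>
          match acc with
          | none => some x
          | some m => if key m < key x then some x else some m) none) := by
    unfold PySem.List.max?
    congr 1
    funext acc x
    cases acc with
    | none => rfl
    | some m => by_cases hlt : key m < key x <;> simp [hlt]
  rw [hmax] at h
  rcases aux l none h with hm | hm
  · exact hm
  · simp at hm

-- per-field: A's count-then-rescan choice = B's stored representative
lemma perField (fin : PySem.Dict String (List (String × String))) (field : String)
    (cs : List (List (String × String))) :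
    AFin fin (field, cs) = BFin fin (field, innerOf cs) := by
  have hcnt : cs.foldl (fun c cand => c.modify (pvGet cand "value") 0 (· + 1)) PySem.Dict.empty
      = PySem.Dict.counter (cs.map fv) := by
    rw [PySem.Dict.counter_eq_foldl, List.foldl_map]
    rfl
  have hkey : (fun k => (PySem.Dict.counter (cs.map fv)).getD k 0)
      = fun k => ((cs.map fv).count k : Int) := funext fun k => PySem.Dict.getD_counter _ _
  have hvals : (innerOf cs).values
      = (PySem.Set.ofList (cs.map fv)).map
          (fun v => ((((cs.map fv).count v : Int)), firstW cs v)) := by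
    simp [PySem.Dict.values, innerOf_items, List.map_map, Function.comp_def]
  simp only [AFin, BFin]
  rw [hcnt, PySem.Dict.keys_counter, hkey, hvals, gmax_eq]
  cases hbv : PySem.List.max? (PySem.Set.ofList (cs.map fv))
      (fun v => ((cs.map fv).count v : Int)) with
  | none => rfl
  | some bv =>
    have hbm : bv ∈ cs.map fv := (PySem.Set.mem_ofList _ _).mp (max?_mem _ _ _ hbv)
    obtain ⟨c0, hc0⟩ := find?_fv_isSome hbm
    have hfw : firstW cs bv = c0 := by simp [firstW, hc0]
    simp only [Option.map_some]
    rw [show (fun c => pvGet c "value" == bv) = (fun c => fv c == bv) from rfl, hc0, hfw]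

-- ===== VERDICT (by name: the statement is the Claim_ definition above) =====
theorem consensus_merge_spec : Claim_equal_consensus_merge := by
  intro fl _ _
  unfold Spec_consensus_merge
  rw [portA_eq, portB_eq]
  have hT : fl.flatten.foldl BStep PySem.Dict.empty
      = mapVals innerOf (fl.flatten.foldl AStep PySem.Dict.empty) := by
    have h := tally_eq fl.flatten PySem.Dict.empty
    simpa [show mapVals innerOf PySem.Dict.empty = PySem.Dict.empty from rfl] using h
  rw [hT]
  have : (mapVals innerOf (fl.flatten.foldl AStep PySem.Dict.empty)).items.foldl BFin PySem.Dict.empty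
      = (fl.flatten.foldl AStep PySem.Dict.empty).items.foldl AFin PySem.Dict.empty := by
    show ((fl.flatten.foldl AStep PySem.Dict.empty).items.map (fun p => (p.1, innerOf p.2))).foldl BFin PySem.Dict.empty = _
    rw [List.foldl_map]
    congr 1
    funext fin p
    exact (perField fin p.1 p.2).symm
  rw [this]
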